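-- pv_equiv track=rewrite | github.com/LeTheKhai/board_dataset_generator | detector.py | map_coordinates
-- ===== SOURCE A (Python) =====
-- def map_coordinates(coordinates, color):
--     """
--     1. input coordinate data from detect_circle()
--     2. predict the type of holds based on the coordinate.
--     3. return list of holds used in the screenshot
--     example:
--     a = map_coordinates(board_coordinate)
--     a = {
--     {start : False, goal : True, holds: J18},
--     {start : False, goal : False, holds: E15},
--     {start : False, goal : False, holds: D13},
--     {start : True, goal : False, holds: A4}
--     }
--     """
--     # define the labels.
--     hold_labels_column = list("ABCDEFGHIJK")
--     hold_labels_row = [i for i in range(18, 0, -1)]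
--     # a list containing all the labels detected from the coordinates
--     hold_labels = []
--     # pick sample hold's coordination
--     # (column, row)
--     A18_coordinate = (142, 128)
--     B18_coordinate = (232, 128)
--     A17_coordinate = (142, 218)
--     # count the distance between holds, both the column and row
--     column_distance = B18_coordinate[0] - A18_coordinate[0]
--     row_distance = A17_coordinate[1] - A18_coordinate[1]
--
--     for coordinate in coordinates:
--         column_label = ""
--         row_label = ""
--         # check column
--         i = 0
--         while (i < len(hold_labels_column)):
--             column_scan = A18_coordinate[0] + column_distance * i
--             if (column_scan - 10) <= coordinate[0] <= (column_scan + 10):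
--                 column_label = hold_labels_column[i]
--                 break
--             i += 1
--
--         # check row
--         i = 0
--         while (i < len(hold_labels_row)):
--             row_scan = A18_coordinate[1] + row_distance * i
--             if (row_scan - 10) <= coordinate[1] <= (row_scan + 10):
--                 row_label = hold_labels_row[i]
--                 break
--             i += 1
--
--         # create the (column + row) label
--         label = column_label + str(row_label)
--         hold_labels.append(label)
--
--     return hold_labels
-- ===== SOURCE B (Python) =====
-- def map_coordinates(coordinates, color):
--     # Direct arithmetic: nearest grid index instead of scanning all candidates.
--     labels = "ABCDEFGHIJK"
--     hold_labels = []
--     for x, y in coordinates: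
--         col = ""
--         i = (x - 97) // 90  # nearest column index to (x-142)/90
--         if 0 <= i <= 10 and abs(x - (142 + 90 * i)) <= 10:
--             col = labels[i]
--         row = ""
--         j = (y - 83) // 90  # nearest row index to (y-128)/90
--         if 0 <= j <= 17 and abs(y - (128 + 90 * j)) <= 10:
--             row = str(18 - j)
--         hold_labels.append(col + row)
--     return hold_labels
-- ===== Notes on version B (the rewrite author's own statement) =====
-- stated objective: simpler
-- what changed: Replaces the two linear scans over all 11 column / 18 row candidate positions with direct floor-division arithmetic computing the nearest grid index, followed by a single bounds-and-window check.
import Mathlib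
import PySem

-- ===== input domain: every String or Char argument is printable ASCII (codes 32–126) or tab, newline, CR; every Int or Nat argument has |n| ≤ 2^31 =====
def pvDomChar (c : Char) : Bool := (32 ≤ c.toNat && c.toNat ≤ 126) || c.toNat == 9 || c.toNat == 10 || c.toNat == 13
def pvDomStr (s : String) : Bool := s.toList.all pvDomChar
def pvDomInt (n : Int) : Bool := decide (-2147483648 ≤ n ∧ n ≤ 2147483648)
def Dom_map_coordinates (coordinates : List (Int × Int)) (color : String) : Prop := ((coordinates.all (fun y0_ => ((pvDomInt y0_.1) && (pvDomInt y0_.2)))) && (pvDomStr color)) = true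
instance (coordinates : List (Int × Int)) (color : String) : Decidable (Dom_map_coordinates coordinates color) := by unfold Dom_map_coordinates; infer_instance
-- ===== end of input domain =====

-- ===== PORT A =====
-- B replaces A's two linear scans by direct index arithmetic (objective: simpler).
def colLabelsA : List String := ["A","B","C","D","E","F","G","H","I","J","K"]
def rowLabelsA : List Int := PySem.List.pyRange 18 0 (-1)

-- while (i < 11): check window around 142 + 90*i, break on hit ('fuel' = remaining iterations)
def colScanA (x : Int) (i : Nat) (fuel : Nat) : String :=
  match fuel with
  | 0 => ""
  | fuel + 1 =>
    if i < 11 then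
      let column_scan : Int := 142 + 90 * (i : Int)
      if column_scan - 10 ≤ x ∧ x ≤ column_scan + 10 then colLabelsA.getD i ""
      else colScanA x (i + 1) fuel
    else ""

-- while (i < 18): check window around 128 + 90*i; on hit the label is str(18 - i), else str("") = ""
def rowScanA (y : Int) (i : Nat) (fuel : Nat) : String :=
  match fuel with
  | 0 => ""
  | fuel + 1 =>
    if i < 18 then
      let row_scan : Int := 128 + 90 * (i : Int)
      if row_scan - 10 ≤ y ∧ y ≤ row_scan + 10 then PySem.Int.toStr (rowLabelsA.getD i 0)
      else rowScanA y (i + 1) fuel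
    else ""

def map_coordinates (coordinates : List (Int × Int)) (color : String) : List String :=
  coordinates.map (fun c => colScanA c.1 0 11 ++ rowScanA c.2 0 18)

-- ===== PORT B =====
def colB (x : Int) : String :=
  let i : Int := PySem.Int.floordiv (x - 97) 90
  if 0 ≤ i ∧ i ≤ 10 ∧ |x - (142 + 90 * i)| ≤ 10 then
    match PySem.Str.pyGet? "ABCDEFGHIJK" i with   -- guard above keeps i in range
    | some c => String.ofList [c]
    | none => ""
  else ""

def rowB (y : Int) : String :=
  let j : Int := PySem.Int.floordiv (y - 83) 90
  if 0 ≤ j ∧ j ≤ 17 ∧ |y - (128 + 90 * j)| ≤ 10 then PySem.Int.toStr (18 - j)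
  else ""

def map_coordinates_alt (coordinates : List (Int × Int)) (color : String) : List String :=
  coordinates.map (fun c => colB c.1 ++ rowB c.2)

-- ===== PRECONDITION & SPEC =====
def Spec_map_coordinates (coordinates : List (Int × Int)) (color : String) (out : List String) : Prop := out = map_coordinates_alt coordinates color
instance (coordinates : List (Int × Int)) (color : String) (out : List String) : Decidable (Spec_map_coordinates coordinates color out) := by unfold Spec_map_coordinates; infer_instance

-- ===== CLAIM (what is proved, stated in full; the proofs are below) =====
def Claim_equal_map_coordinates : Prop := ∀ (coordinates : List (Int × Int)) (color : String), Dom_map_coordinates coordinates color → Spec_map_coordinates coordinates color (map_coordinates coordinates color)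

-- ===== LEMMAS AND PROOFS =====

theorem colB_hit (x : Int) (i : Nat) (hi : i < 11)
    (hw : 132 + 90 * (i : Int) ≤ x ∧ x ≤ 152 + 90 * (i : Int)) :
    colB x = colLabelsA.getD i "" := by
  have hq : PySem.Int.floordiv (x - 97) 90 = (i : Int) := by
    rw [PySem.Int.floordiv_eq_ediv_of_pos (by norm_num)]
    omega
  simp only [colB]
  rw [hq, if_pos (by refine ⟨by omega, by exact_mod_cast Nat.lt_succ_iff.mp hi, ?_⟩; rw [abs_le]; omega)]
  interval_cases i <;> rfl

theorem colB_miss (x : Int)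
    (h : ∀ i : Nat, i < 11 → ¬(132 + 90 * (i : Int) ≤ x ∧ x ≤ 152 + 90 * (i : Int))) :
    colB x = "" := by
  simp only [colB]
  split_ifs with hc
  · exfalso
    obtain ⟨h0, h10, habs⟩ := hc
    rw [PySem.Int.floordiv_eq_ediv_of_pos (by norm_num)] at h0 h10 habs
    rw [abs_le] at habs
    exact h ((x - 97) / 90).toNat (by omega) (by omega)
  · rfl

theorem rowB_hit (y : Int) (i : Nat) (hi : i < 18)
    (hw : 118 + 90 * (i : Int) ≤ y ∧ y ≤ 138 + 90 * (i : Int)) :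
    rowB y = PySem.Int.toStr (rowLabelsA.getD i 0) := by
  have hq : PySem.Int.floordiv (y - 83) 90 = (i : Int) := by
    rw [PySem.Int.floordiv_eq_ediv_of_pos (by norm_num)]
    omega
  simp only [rowB]
  rw [hq, if_pos (by refine ⟨by omega, by exact_mod_cast Nat.lt_succ_iff.mp hi, ?_⟩; rw [abs_le]; omega)]
  congr 1
  interval_cases i <;> rfl

theorem rowB_miss (y : Int)
    (h : ∀ i : Nat, i < 18 → ¬(118 + 90 * (i : Int) ≤ y ∧ y ≤ 138 + 90 * (i : Int))) :
    rowB y = "" := by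
  simp only [rowB]
  split_ifs with hc
  · exfalso
    obtain ⟨h0, h17, habs⟩ := hc
    rw [PySem.Int.floordiv_eq_ediv_of_pos (by norm_num)] at h0 h17 habs
    rw [abs_le] at habs
    exact h ((y - 83) / 90).toNat (by omega) (by omega)
  · rfl

theorem colScanA_eq (x : Int) : ∀ (fuel i : Nat), fuel = 11 - i →
    (∀ j : Nat, j < i → ¬(132 + 90 * (j : Int) ≤ x ∧ x ≤ 152 + 90 * (j : Int))) →
    colScanA x i fuel = colB x := by
  intro fuel
  induction fuel with
  | zero =>
    intro i hf hprev
    exact (colB_miss x (fun j hj => hprev j (by omega))).symm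
  | succ fuel ih =>
    intro i hf hprev
    simp only [colScanA]
    split_ifs with h1 h2
    · exact (colB_hit x i h1 (by constructor <;> omega)).symm
    · exact ih (i + 1) (by omega)
        (fun j hj => by
          rcases Nat.lt_succ_iff_lt_or_eq.mp hj with h | h
          · exact hprev j h
          · subst h; intro hw; exact h2 (by constructor <;> omega))
    · omega
theorem rowScanA_eq (y : Int) : ∀ (fuel i : Nat), fuel = 18 - i →
    (∀ j : Nat, j < i → ¬(118 + 90 * (j : Int) ≤ y ∧ y ≤ 138 + 90 * (j : Int))) →
    rowScanA y i fuel = rowB y := by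
  intro fuel
  induction fuel with
  | zero =>
    intro i hf hprev
    exact (rowB_miss y (fun j hj => hprev j (by omega))).symm
  | succ fuel ih =>
    intro i hf hprev
    simp only [rowScanA]
    split_ifs with h1 h2
    · exact (rowB_hit y i h1 (by constructor <;> omega)).symm
    · exact ih (i + 1) (by omega)
        (fun j hj => by
          rcases Nat.lt_succ_iff_lt_or_eq.mp hj with h | h
          · exact hprev j h
          · subst h; intro hw; exact h2 (by constructor <;> omega))
    · omega

-- ===== VERDICT (by name: the statement is the Claim_ definition above) =====
theorem map_coordinates_spec : Claim_equal_map_coordinates := by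
  intro coordinates color _
  unfold Spec_map_coordinates map_coordinates map_coordinates_alt
  refine List.map_congr_left (fun c _ => ?_)
  rw [colScanA_eq c.1 11 0 rfl (by omega), rowScanA_eq c.2 18 0 rfl (by omega)]
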